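-- pv_equiv track=rewrite | github.com/HWeber-tech/emp_proving_ground_v1 | src/sensory/when/session_analytics.py | normalise_session_tokens
-- ===== SOURCE A (Python) =====
-- from typing import Iterable, Mapping
--
-- _SESSION_TOKEN_ORDER: tuple[str, ...] = (
--     "Asia",
--     "London",
--     "NY",
--     "auction_open",
--     "auction_close",
--     "halt",
--     "resume",
-- )
--
-- def normalise_session_tokens(candidates: Iterable[str]) -> tuple[str, ...]:
--     """Return session tokens in canonical order without duplicates."""
--
--     seen: set[str] = set()
--     ordered: list[str] = []
--
--     for token in candidates:
--         canonical = str(token)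
--         if not canonical:
--             continue
--         if canonical not in seen:
--             seen.add(canonical)
--             ordered.append(canonical)
--
--     prioritised: list[str] = []
--     for token in _SESSION_TOKEN_ORDER:
--         if token in seen:
--             prioritised.append(token)
--             seen.remove(token)
--
--     for token in ordered:
--         if token in seen:
--             prioritised.append(token)
--             seen.remove(token)
--
--     return tuple(prioritised)
-- ===== SOURCE B (Python) =====
-- _SESSION_TOKEN_ORDER: tuple[str, ...] = (
--     "Asia",
--     "London",
--     "NY",
--     "auction_open",
--     "auction_close",
--     "halt",
--     "resume",
-- )
--
-- def normalise_session_tokens(candidates):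
--     """Return session tokens in canonical order without duplicates."""
--     rank = {token: i for i, token in enumerate(_SESSION_TOKEN_ORDER)}
--     n = len(_SESSION_TOKEN_ORDER)
--     uniq = {}  # unique non-empty canonical tokens -> first-seen insertion index
--     for token in candidates:
--         canonical = str(token)
--         if canonical and canonical not in uniq:
--             uniq[canonical] = len(uniq)
--     # one key-based sort: priority tokens by rank (< n), the rest after them in
--     # first-seen order; all keys are distinct, so the order is deterministic
--     return tuple(sorted(uniq, key=lambda t: rank.get(t, n + uniq[t])))
-- ===== Notes on version B (the rewrite author's own statement) =====
-- stated objective: alternative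
-- what changed: A's two-phase partition (priority scan over _SESSION_TOKEN_ORDER plus a leftover scan, both removing from a mutable seen-set) is replaced by one dict mapping each unique non-empty token to its first-seen index and a single sorted() call whose key sends priority tokens to their rank and all others to n + first-seen index; distinct keys make the order deterministic.
import Mathlib
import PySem

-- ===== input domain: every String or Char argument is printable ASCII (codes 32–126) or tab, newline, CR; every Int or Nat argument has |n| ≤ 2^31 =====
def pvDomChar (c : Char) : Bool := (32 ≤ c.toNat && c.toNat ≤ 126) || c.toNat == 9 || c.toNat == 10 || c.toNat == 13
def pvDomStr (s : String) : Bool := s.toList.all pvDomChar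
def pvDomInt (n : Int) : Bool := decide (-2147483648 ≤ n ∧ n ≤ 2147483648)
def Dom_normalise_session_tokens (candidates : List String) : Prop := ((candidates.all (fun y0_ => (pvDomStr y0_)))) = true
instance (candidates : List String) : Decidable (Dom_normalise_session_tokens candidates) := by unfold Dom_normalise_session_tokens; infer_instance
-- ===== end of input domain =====

-- B replaces A's two-phase partition (priority scan + leftover scan over a mutable seen-set)
-- by one dict of first-seen indices and a single key-based sort; objective: alternative (same cost).
-- str(token) on an element of a list[str] is the identity, ported as such in both versions.

-- _SESSION_TOKEN_ORDER (module constant used by both versions)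
def pvOrder : List String :=
  ["Asia", "London", "NY", "auction_open", "auction_close", "halt", "resume"]

-- ===== PORT A =====
-- body of A's first loop: dedup the non-empty tokens into (seen, ordered)
def pvStep1 (st : PySem.Set String × List String) (token : String) :
    PySem.Set String × List String :=
  let canonical := token
  if canonical = "" then st
  else if PySem.Set.contains st.1 canonical then st
  else (PySem.Set.add st.1 canonical, st.2 ++ [canonical])

-- body of A's second and third loops: move a still-unseen token into prioritised
-- (seen.remove is guarded by the membership test, so it is Set.discard here, exactly)
def pvStep2 (st : List String × PySem.Set String) (token : String) :
    List String × PySem.Set String :=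
  if PySem.Set.contains st.2 token then (st.1 ++ [token], PySem.Set.discard st.2 token)
  else st

def normalise_session_tokens (candidates : List String) : List String :=
  let s1 := candidates.foldl pvStep1 (PySem.Set.empty, [])
  let s2 := pvOrder.foldl pvStep2 ([], s1.1)
  let s3 := s1.2.foldl pvStep2 s2
  s3.1

-- ===== PORT B =====
-- rank = {token: i for i, token in enumerate(_SESSION_TOKEN_ORDER)}
def pvRankB : PySem.Dict String Int :=
  (PySem.List.enumerate pvOrder).foldl (fun d p => d.insert p.2 p.1) PySem.Dict.empty

-- n = len(_SESSION_TOKEN_ORDER)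
def pvNB : Int := (pvOrder.length : Int)

-- body of B's single loop: record each unique non-empty token's first-seen index
def pvStepB (d : PySem.Dict String Int) (token : String) : PySem.Dict String Int :=
  let canonical := token
  if canonical = "" then d
  else if d.contains canonical then d
  else d.insert canonical (d.size : Int)

-- the sort key: lambda t: rank.get(t, n + uniq[t])  (uniq[t] never raises: t is a key of uniq)
def pvKeyB (uniq : PySem.Dict String Int) (t : String) : Int :=
  (pvRankB.get? t).getD (pvNB + (uniq.get? t).getD 0)

def normalise_session_tokens_alt (candidates : List String) : List String :=
  let uniq := candidates.foldl pvStepB PySem.Dict.empty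
  PySem.List.sorted uniq.keys (pvKeyB uniq) false

-- ===== PRECONDITION & SPEC =====
def Spec_normalise_session_tokens (candidates : List String) (out : List String) : Prop := out = normalise_session_tokens_alt candidates
instance (candidates : List String) (out : List String) : Decidable (Spec_normalise_session_tokens candidates out) := by unfold Spec_normalise_session_tokens; infer_instance

-- ===== CLAIM (what is proved, stated in full; the proofs are below) =====
def Claim_equal_normalise_session_tokens : Prop := ∀ (candidates : List String), Dom_normalise_session_tokens candidates → Spec_normalise_session_tokens candidates (normalise_session_tokens candidates)

-- ===== LEMMAS AND PROOFS =====

-- the deduplicated non-empty tokens, in first-seen order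
def pvU (candidates : List String) : List String :=
  PySem.Set.ofList (candidates.filter (fun t => !(t == "")))

lemma pv_nodup_U (candidates : List String) : (pvU candidates).Nodup :=
  PySem.Set.nodup_ofList _

-- A's first loop keeps seen = ordered (both are the deduped non-empty tokens)
lemma pvA_phase1 (xs : List String) (s : List String) :
    xs.foldl pvStep1 (s, s)
    = ((xs.filter (fun t => !(t == ""))).foldl PySem.Set.add s,
       (xs.filter (fun t => !(t == ""))).foldl PySem.Set.add s) := by
  induction xs generalizing s with
  | nil => rfl
  | cons x t ih =>
    rw [List.foldl_cons, List.filter_cons]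
    by_cases hx : x = ""
    · rw [show pvStep1 (s, s) x = (s, s) by simp [pvStep1, hx]]
      simp only [hx]
      simpa using ih s
    · by_cases hc : PySem.Set.contains s x = true
      · have hm : x ∈ s := (PySem.Set.contains_iff _ _).mp hc
        rw [show pvStep1 (s, s) x = (s, s) by simp [pvStep1, hx, hm]]
        have hadd : PySem.Set.add s x = s := by simp [PySem.Set.add, hm]
        simp only [show (!(x == "")) = true by simp [hx], if_pos, List.foldl_cons, hadd]
        exact ih s
      · have hm : x ∉ s := by simpa [PySem.Set.contains_iff] using hc
        rw [show pvStep1 (s, s) x = (s ++ [x], s ++ [x]) by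
          simp [pvStep1, PySem.Set.add, hx, hm]]
        have hadd : PySem.Set.add s x = s ++ [x] := by simp [PySem.Set.add, hm]
        simp only [show (!(x == "")) = true by simp [hx], if_pos, List.foldl_cons, hadd]
        exact ih (s ++ [x])

-- A's second/third loop, characterised on a duplicate-free list
lemma pvA_phase23 (l : List String) (pr seen : List String) (hl : l.Nodup) :
    l.foldl pvStep2 (pr, seen)
    = (pr ++ l.filter (fun t => seen.contains t),
       seen.filter (fun t => !(l.contains t))) := by
  induction l generalizing pr seen with
  | nil => simp
  | cons x t ih =>
    rcases List.nodup_cons.mp hl with ⟨hx, ht⟩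
    rw [List.foldl_cons]
    by_cases hc : PySem.Set.contains seen x = true
    · have hm : x ∈ seen := (PySem.Set.contains_iff _ _).mp hc
      have hcl : List.contains seen x = true := by simpa [List.contains_iff_mem] using hm
      rw [show pvStep2 (pr, seen) x = (pr ++ [x], PySem.Set.discard seen x) by
        simp [pvStep2, hm]]
      rw [ih _ _ ht]
      have h1 : List.filter (fun y => List.contains (PySem.Set.discard seen x) y) t
          = List.filter (fun y => List.contains seen y) t := by
        apply List.filter_congr
        intro y hy
        have hyx : y ≠ x := fun h => hx (h ▸ hy)
        rw [Bool.eq_iff_iff]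
        simp [PySem.Set.discard, List.contains_iff_mem, List.mem_filter, hyx]
      have h2 : List.filter (fun y => !(List.contains t y)) (PySem.Set.discard seen x)
          = List.filter (fun y => !(List.contains (x :: t) y)) seen := by
        simp only [PySem.Set.discard, List.filter_filter]
        apply List.filter_congr
        intro y hy
        by_cases hxy : y = x
        · subst hxy; simp
        · simp [List.contains_iff_mem, hxy, Ne.symm hxy]
      rw [h1, h2, List.filter_cons]
      simp [hm]
    · have hxs : x ∉ seen := by simpa [PySem.Set.contains_iff] using hc
      have hcl : List.contains seen x = false := by
        simpa [List.contains_iff_mem] using hxs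
      rw [show pvStep2 (pr, seen) x = (pr, seen) by simp [pvStep2, hxs]]
      rw [ih _ _ ht]
      have h2 : List.filter (fun y => !(List.contains t y)) seen
          = List.filter (fun y => !(List.contains (x :: t) y)) seen := by
        apply List.filter_congr
        intro y hy
        have hyx : y ≠ x := fun h => hxs (h ▸ hy)
        simp [List.contains_iff_mem, hyx, Ne.symm hyx]
      rw [h2, List.filter_cons]
      simp [hxs]

-- pvOrder has no duplicates
lemma pv_nodup_order : pvOrder.Nodup := by decide

-- A computes: priority tokens present, then the remaining unique tokens in first-seen order
lemma pvA_char (candidates : List String) :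
    normalise_session_tokens candidates
    = pvOrder.filter (fun t => (pvU candidates).contains t)
      ++ (pvU candidates).filter (fun t => !(pvOrder.contains t)) := by
  have h1 := pvA_phase1 candidates []
  have hU : (candidates.filter (fun t => !(t == ""))).foldl PySem.Set.add []
      = pvU candidates := (PySem.Set.ofList_eq_foldl _).symm
  rw [hU] at h1
  simp only [normalise_session_tokens]
  rw [show (PySem.Set.empty : PySem.Set String) = ([] : List String) from rfl, h1]
  rw [pvA_phase23 _ _ _ pv_nodup_order]
  rw [pvA_phase23 _ _ _ (pv_nodup_U candidates)]
  simp only [List.nil_append]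
  congr 1
  apply List.filter_congr
  intro y hy
  rw [Bool.eq_iff_iff]
  simp [List.mem_filter, hy]

-- value cast used to state B's index table (dict values are Python ints)
def pvF (p : String × Nat) : String × Int := (p.1, (p.2 : Int))

lemma pv_keys_mk (L : List String) :
    (PySem.Dict.mk (L.zipIdx.map pvF)).keys = L := by
  show (L.zipIdx.map pvF).map Prod.fst = L
  rw [List.map_map]
  exact List.zipIdx_map_fst 0 L

-- B's dict loop builds exactly the first-seen index table of the deduped tokens
lemma pvB_uniq (xs : List String) (L : List String) :
    xs.foldl pvStepB (PySem.Dict.mk (L.zipIdx.map pvF))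
    = PySem.Dict.mk
        (((xs.filter (fun t => !(t == ""))).foldl PySem.Set.add L).zipIdx.map pvF) := by
  induction xs generalizing L with
  | nil => rfl
  | cons x t ih =>
    rw [List.foldl_cons, List.filter_cons]
    by_cases hx : x = ""
    · rw [show pvStepB (PySem.Dict.mk (L.zipIdx.map pvF)) x
          = PySem.Dict.mk (L.zipIdx.map pvF) by simp [pvStepB, hx]]
      simpa [hx] using ih L
    · have hcont : (PySem.Dict.mk (L.zipIdx.map pvF)).contains x = decide (x ∈ L) := by
        rw [PySem.Dict.contains_eq_decide_mem_keys, pv_keys_mk]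
      by_cases hm : x ∈ L
      · rw [show pvStepB (PySem.Dict.mk (L.zipIdx.map pvF)) x
            = PySem.Dict.mk (L.zipIdx.map pvF) by simp [pvStepB, hx, hcont, hm]]
        have hadd : PySem.Set.add L x = L := by simp [PySem.Set.add, hm]
        simp only [show (!(x == "")) = true by simp [hx], if_pos, List.foldl_cons, hadd]
        exact ih L
      · have hstep : pvStepB (PySem.Dict.mk (L.zipIdx.map pvF)) x
            = PySem.Dict.mk ((L ++ [x]).zipIdx.map pvF) := by
          have hc' : (PySem.Dict.mk (L.zipIdx.map pvF)).contains x = false := by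
            simp [hcont, hm]
          have hsz : (PySem.Dict.mk (L.zipIdx.map pvF)).size = L.length := by
            show (L.zipIdx.map pvF).length = L.length
            simp
          apply PySem.Dict.ext
          rw [show pvStepB (PySem.Dict.mk (L.zipIdx.map pvF)) x
              = (PySem.Dict.mk (L.zipIdx.map pvF)).insert x
                  (((PySem.Dict.mk (L.zipIdx.map pvF)).size : Int)) by
            simp [pvStepB, hx, hc']]
          rw [PySem.Dict.items_insert_of_not_contains _ _ hc', hsz]
          show L.zipIdx.map pvF ++ [(x, (L.length : Int))]
              = ((L ++ [x]).zipIdx).map pvF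
          rw [List.zipIdx_append]
          simp [pvF]
        rw [hstep]
        have hadd : PySem.Set.add L x = L ++ [x] := by simp [PySem.Set.add, hm]
        simp only [show (!(x == "")) = true by simp [hx], if_pos, List.foldl_cons, hadd]
        exact ih (L ++ [x])

-- the index table on pvU, and the facts pv_main needs about it
lemma pvB_uniq_char (candidates : List String) :
    candidates.foldl pvStepB PySem.Dict.empty
    = PySem.Dict.mk ((pvU candidates).zipIdx.map pvF) := by
  have h := pvB_uniq candidates []
  simpa [pvU, PySem.Set.ofList_eq_foldl] using h

lemma pv_uniq_get (candidates : List String) (i : Nat) (hi : i < (pvU candidates).length) :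
    (PySem.Dict.mk ((pvU candidates).zipIdx.map pvF)).get? (pvU candidates)[i]
      = some (i : Int) := by
  apply PySem.Dict.get?_of_mem_items
  · show ((pvU candidates)[i], (i : Int)) ∈ ((pvU candidates).zipIdx.map pvF)
    have : ((pvU candidates)[i], i) ∈ (pvU candidates).zipIdx := by
      have := List.getElem_zipIdx (l := pvU candidates) (j := 0)
        (i := i) (by simpa using hi)
      rw [show (0 + i) = i from by omega] at this
      exact this ▸ List.getElem_mem _
    exact List.mem_map.mpr ⟨_, this, rfl⟩
  · rw [pv_keys_mk]
    exact pv_nodup_U candidates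

-- rank lookups: the keys of pvRankB are exactly pvOrder
lemma pv_rank_keys : pvRankB.keys = pvOrder := by decide

lemma pv_rank_none {t : String} (h : t ∉ pvOrder) : pvRankB.get? t = none := by
  rw [PySem.Dict.get?_eq_none_iff_not_mem_keys, pv_rank_keys]
  exact h

-- key values on the priority tokens (independent of the uniq table)
lemma pv_key_order_map (uniq : PySem.Dict String Int) :
    pvOrder.map (pvKeyB uniq) = [0, 1, 2, 3, 4, 5, 6] := by
  simp [pvOrder, pvKeyB,
    show pvRankB.get? "Asia" = some 0 from by decide,
    show pvRankB.get? "London" = some 1 from by decide,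
    show pvRankB.get? "NY" = some 2 from by decide,
    show pvRankB.get? "auction_open" = some 3 from by decide,
    show pvRankB.get? "auction_close" = some 4 from by decide,
    show pvRankB.get? "halt" = some 5 from by decide,
    show pvRankB.get? "resume" = some 6 from by decide]

lemma pv_key_order_lt (uniq : PySem.Dict String Int) {t : String} (h : t ∈ pvOrder) :
    pvKeyB uniq t < 7 := by
  have := List.mem_map_of_mem (f := pvKeyB uniq) h
  rw [pv_key_order_map] at this
  simp only [List.mem_cons, List.not_mem_nil, or_false] at this
  rcases this with h' | h' | h' | h' | h' | h' | h' <;> omega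

-- nonnegativity of the stored first-seen indices
lemma pv_uniq_get_nonneg (candidates : List String) {t : String} (ht : t ∈ pvU candidates) :
    0 ≤ ((PySem.Dict.mk ((pvU candidates).zipIdx.map pvF)).get? t).getD 0 := by
  rcases List.mem_iff_getElem.mp ht with ⟨i, hi, rfl⟩
  rw [pv_uniq_get candidates i hi]
  simp

theorem pv_main (candidates : List String) :
    normalise_session_tokens candidates = normalise_session_tokens_alt candidates := by
  simp only [normalise_session_tokens_alt]
  rw [pvB_uniq_char, pv_keys_mk, pvA_char]
  refine (PySem.List.sorted_eq_of_perm_of_pairwise_lt _ _ _ ?_ ?_).symm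
  · -- the two-block list is a permutation of the deduped tokens
    have h1 : (pvOrder.filter (fun t => (pvU candidates).contains t)).Perm
        ((pvU candidates).filter (fun t => pvOrder.contains t)) := by
      rw [List.perm_ext_iff_of_nodup (pv_nodup_order.filter _) ((pv_nodup_U _).filter _)]
      intro a
      simp only [List.mem_filter, List.contains_iff_mem]
      tauto
    exact (h1.append_right _).trans
      (List.filter_append_perm (fun t => pvOrder.contains t) (pvU candidates))
  · -- the sort key strictly increases along the two-block list
    rw [List.pairwise_append]
    have hU0 : (pvU candidates).Pairwise (fun a b =>
        ((PySem.Dict.mk ((pvU candidates).zipIdx.map pvF)).get? a).getD 0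
          < ((PySem.Dict.mk ((pvU candidates).zipIdx.map pvF)).get? b).getD 0) := by
      rw [List.pairwise_iff_getElem]
      intro i j hi hj hij
      rw [pv_uniq_get candidates i hi, pv_uniq_get candidates j hj]
      simpa using hij
    refine ⟨?_, ?_, ?_⟩
    · -- priority block: keys are the ranks 0..6, increasing along pvOrder
      have hord : pvOrder.Pairwise (fun a b =>
          pvKeyB (PySem.Dict.mk ((pvU candidates).zipIdx.map pvF)) a
            < pvKeyB (PySem.Dict.mk ((pvU candidates).zipIdx.map pvF)) b) := by
        rw [← List.pairwise_map (f := pvKeyB _), pv_key_order_map]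
        decide
      exact List.Pairwise.sublist List.filter_sublist hord
    · -- leftover block: keys are 7 + first-seen index, increasing along pvU
      refine List.Pairwise.imp_of_mem ?_ (List.Pairwise.sublist List.filter_sublist hU0)
      intro a b ha hb hab
      have haO : a ∉ pvOrder := by
        have := (List.mem_filter.mp ha).2
        simpa [List.contains_iff_mem] using this
      have hbO : b ∉ pvOrder := by
        have := (List.mem_filter.mp hb).2
        simpa [List.contains_iff_mem] using this
      simp only [pvKeyB, pv_rank_none haO, pv_rank_none hbO, Option.getD_none]
      omega
    · -- every priority key (< 7) is below every leftover key (= 7 + index)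
      intro a ha b hb
      have haO : a ∈ pvOrder := (List.mem_filter.mp ha).1
      have hbU : b ∈ pvU candidates := (List.mem_filter.mp hb).1
      have hbO : b ∉ pvOrder := by
        have := (List.mem_filter.mp hb).2
        simpa [List.contains_iff_mem] using this
      have h7 := pv_key_order_lt (PySem.Dict.mk ((pvU candidates).zipIdx.map pvF)) haO
      have hnn := pv_uniq_get_nonneg candidates hbU
      have hb' : pvKeyB (PySem.Dict.mk ((pvU candidates).zipIdx.map pvF)) b
          = pvNB + ((PySem.Dict.mk ((pvU candidates).zipIdx.map pvF)).get? b).getD 0 := by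
        simp [pvKeyB, pv_rank_none hbO]
      rw [hb']
      have : pvNB = 7 := by decide
      omega

-- ===== VERDICT (by name: the statement is the Claim_ definition above) =====
theorem normalise_session_tokens_spec : Claim_equal_normalise_session_tokens := by
  intro candidates _
  unfold Spec_normalise_session_tokens
  exact pv_main candidates
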